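-- pv_equiv track=rewrite | github.com/bydlocoderBRN/Algorihms | Kurs/3 task.py | calculate_min_index
-- ===== SOURCE A (Python) =====
-- def calculate_min_index(lists):
--     lsts = [[]]
--     lsts = lists
--     lens = []
--     for i in lsts:
--         lens.append(len(i))
--     min_len = min(lens)
--     for i in range(len(lens)):
--         if lens[i] == min_len:
--             return i
-- ===== SOURCE B (Python) =====
-- def calculate_min_index(lists):
--     best_index = None
--     best_len = None
--     for i, x in enumerate(lists):
--         if best_len is None or len(x) < best_len:
--             best_index = i
--             best_len = len(x)
--     if best_index is None:
--         raise ValueError("min() arg is an empty sequence")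
--     return best_index
-- ===== Notes on version B (the rewrite author's own statement) =====
-- stated objective: simpler
-- what changed: Replaces A's three passes (build a lengths list, take min, scan for the first index equal to it) with a single enumerate loop tracking best_index/best_len with strict <.
import Mathlib
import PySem

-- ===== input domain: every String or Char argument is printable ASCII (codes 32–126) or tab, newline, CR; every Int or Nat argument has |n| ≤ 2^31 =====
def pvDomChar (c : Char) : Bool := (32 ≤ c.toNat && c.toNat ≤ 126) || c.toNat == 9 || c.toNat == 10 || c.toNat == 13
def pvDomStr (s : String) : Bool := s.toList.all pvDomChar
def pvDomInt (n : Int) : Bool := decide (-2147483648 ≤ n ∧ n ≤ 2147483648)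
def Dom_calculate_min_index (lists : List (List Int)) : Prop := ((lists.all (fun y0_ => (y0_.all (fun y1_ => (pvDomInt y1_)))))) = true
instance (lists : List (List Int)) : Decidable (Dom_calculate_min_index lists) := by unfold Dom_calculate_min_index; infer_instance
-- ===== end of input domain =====

-- B does one pass tracking best index/length instead of A's three passes; on the empty list both raise ValueError (excluded by Pre_).

-- ===== PORT A =====
-- second loop of A: 'for i in range(len(lens)): if lens[i] == min_len: return i'
-- (indices come from range(len(lens)), so lens[i] is always in bounds; the final [] case
--  is Python falling off the loop and returning None — unreachable when min_len ∈ lens)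
def loopA_calculate_min_index (lens : List Int) (min_len : Int) : List Int → Int
  | [] => 0
  | i :: rest =>
    if (PySem.List.pyGet? lens i).getD 0 == min_len then i
    else loopA_calculate_min_index lens min_len rest

def calculate_min_index (lists : List (List Int)) : Int :=
  let lsts : List (List Int) := [[]]
  let lsts := lists
  let lens : List Int := lsts.foldl (fun acc i => acc ++ [(i.length : Int)]) []
  match PySem.List.min? lens (fun x => x) with
  | none => 0  -- min([]) raises ValueError; excluded by Pre_
  | some min_len => loopA_calculate_min_index lens min_len (PySem.List.pyRange 0 (lens.length : Int) 1)

-- ===== PORT B =====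
-- B's single enumerate loop; state = none before the first element, some (best_index, best_len) after
def loopB_calculate_min_index : List (List Int) → Int → Option (Int × Int) → Option (Int × Int)
  | [], _, st => st
  | x :: rest, i, st =>
    let st' : Option (Int × Int) :=
      match st with
      | none => some (i, (x.length : Int))
      | some (bi, bl) => if (x.length : Int) < bl then some (i, (x.length : Int)) else some (bi, bl)
    loopB_calculate_min_index rest (i + 1) st'

def calculate_min_index_alt (lists : List (List Int)) : Int :=
  match loopB_calculate_min_index lists 0 none with
  | none => 0  -- best_index is None: B raises ValueError; excluded by Pre_
  | some (bi, _) => bi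

-- ===== PRECONDITION & SPEC =====
-- On the empty list A raises ValueError (min of an empty sequence), so it is excluded.
def Pre_calculate_min_index (lists : List (List Int)) : Prop := lists ≠ []
instance (lists : List (List Int)) : Decidable (Pre_calculate_min_index lists) := by unfold Pre_calculate_min_index; infer_instance

def pvWitness_calculate_min_index : List (List Int) := [[1, 2], [3]]

def Spec_calculate_min_index (lists : List (List Int)) (out : Int) : Prop := out = calculate_min_index_alt lists
instance (lists : List (List Int)) (out : Int) : Decidable (Spec_calculate_min_index lists out) := by unfold Spec_calculate_min_index; infer_instance

-- ===== CLAIM (what is proved, stated in full; the proofs are below) =====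
def Claim_equal_calculate_min_index : Prop := ∀ (lists : List (List Int)), Dom_calculate_min_index lists → Pre_calculate_min_index lists → Spec_calculate_min_index lists (calculate_min_index lists)

-- ===== LEMMAS AND PROOFS =====

lemma foldl_append_len (l : List (List Int)) (acc : List Int) :
    l.foldl (fun acc i => acc ++ [(i.length : Int)]) acc = acc ++ l.map (fun i => (i.length : Int)) := by
  induction l generalizing acc with
  | nil => simp
  | cons x rest ih => simp [List.foldl, ih]

lemma foldl_min_le (L : List Int) : ∀ b : Int, L.foldl min b ≤ b := by
  induction L with
  | nil => simp
  | cons x rest ih =>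
    intro b
    exact le_trans (ih (min b x)) (min_le_left b x)

-- A's scan returns k + (index of the first occurrence of m in lens.drop k)
lemma loopA_spec (lens : List Int) (m : Int) :
    ∀ (d : List Int) (k : ℕ), lens.drop k = d → m ∈ d →
      loopA_calculate_min_index lens m (PySem.List.pyRange (k : Int) (lens.length : Int) 1)
        = (k : Int) + (d.idxOf m : Int) := by
  intro d
  induction d with
  | nil => intro k _ hm; cases hm
  | cons x rest ih =>
    intro k hdrop hm
    have hk : k < lens.length := by
      by_contra h
      have : lens.drop k = [] := List.drop_eq_nil_of_le (by omega)
      rw [this] at hdrop; cases hdrop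
    have hkI : (k : Int) < (lens.length : Int) := by exact_mod_cast hk
    rw [PySem.List.pyRange_one_cons hkI]
    have hget : lens[k]? = some x := by
      have : (lens.drop k)[0]? = some x := by rw [hdrop]; rfl
      rwa [List.getElem?_drop, Nat.add_zero] at this
    have hgetP : PySem.List.pyGet? lens (k : Int) = some x := by
      rw [PySem.List.pyGet?_natCast, hget]
    unfold loopA_calculate_min_index
    rw [hgetP]
    by_cases hx : x = m
    · rw [if_pos (by simp [hx]), hx, List.idxOf_cons_self]
      push_cast
      ring
    · have hne : (x == m) = false := by simp [hx]
      rw [if_neg (by simp [hx])]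
      have hdrop' : lens.drop (k + 1) = rest := by
        have h2 : (lens.drop k).tail = rest := by rw [hdrop]; rfl
        rwa [List.tail_drop] at h2
      have hm' : m ∈ rest := by
        cases hm with
        | head => exact absurd rfl hx
        | tail _ h => exact h
      have := ih (k + 1) hdrop' hm'
      rw [show ((k : Int) + 1) = ((k + 1 : ℕ) : Int) by push_cast; ring, this]
      rw [List.idxOf_cons, hne]
      simp only [cond_false]
      push_cast
      ring

-- B's loop: the final best_len is the running min, and the final best_index is the
-- starting index if it already attains that min, else k + first index attaining it.
lemma loopB_spec (s : List (List Int)) :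
    ∀ (k bi bl : Int),
      loopB_calculate_min_index s k (some (bi, bl))
        = some (if (s.map (fun x => (x.length : Int))).foldl min bl = bl then bi
                else k + (((s.map (fun x => (x.length : Int))).idxOf
                            ((s.map (fun x => (x.length : Int))).foldl min bl) : ℕ) : Int),
                (s.map (fun x => (x.length : Int))).foldl min bl) := by
  induction s with
  | nil => intro k bi bl; simp [loopB_calculate_min_index]
  | cons x rest ih =>
    intro k bi bl
    set xl : Int := (x.length : Int) with hxl
    set Lr : List Int := rest.map (fun x => (x.length : Int)) with hLr
    unfold loopB_calculate_min_index
    simp only [← hxl, ← hLr, List.map_cons, List.foldl_cons]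
    by_cases hx : xl < bl
    · rw [if_pos hx, ih (k + 1) k xl]
      have hmin : min bl xl = xl := by omega
      rw [hmin]
      set M : Int := Lr.foldl min xl with hM
      have hMle : M ≤ xl := foldl_min_le Lr xl
      have hMne : M ≠ bl := by omega
      rw [if_neg hMne]
      by_cases hMx : M = xl
      · rw [if_pos hMx, hMx, List.idxOf_cons_self]
        simp
      · rw [if_neg hMx]
        have hne : (xl == M) = false := by simp [Ne.symm hMx]
        rw [List.idxOf_cons, hne]
        simp only [cond_false]
        push_cast
        ring_nf
    · rw [if_neg hx, ih (k + 1) bi bl]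
      have hmin : min bl xl = bl := by omega
      rw [hmin]
      set M : Int := Lr.foldl min bl with hM
      have hMle : M ≤ bl := foldl_min_le Lr bl
      by_cases hMb : M = bl
      · rw [if_pos hMb, if_pos hMb]
      · rw [if_neg hMb, if_neg hMb]
        have hMx : xl ≠ M := by omega
        have hne : (xl == M) = false := by simp [hMx]
        rw [List.idxOf_cons, hne]
        simp only [cond_false]
        push_cast
        ring_nf

-- ===== VERDICT (by name: the statement is the Claim_ definition above) =====
theorem calculate_min_index_spec : Claim_equal_calculate_min_index := by
  intro lists _ hpre
  unfold Spec_calculate_min_index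
  cases lists with
  | nil => exact absurd rfl hpre
  | cons y rest =>
    set yl : Int := (y.length : Int) with hyl
    set Lr : List Int := rest.map (fun x => (x.length : Int)) with hLr
    set M : Int := Lr.foldl min yl with hM
    -- A side
    have hlens : (y :: rest).foldl (fun acc i => acc ++ [(i.length : Int)]) ([] : List Int)
        = yl :: Lr := by
      rw [foldl_append_len]; simp [hyl, hLr]
    have hminA : PySem.List.min? (yl :: Lr) (fun x => x) = some M :=
      PySem.List.min?_id_cons yl Lr
    have hmem : M ∈ yl :: Lr := PySem.List.min?_mem hminA
    have hA : calculate_min_index (y :: rest)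
        = ((yl :: Lr).idxOf M : Int) := by
      unfold calculate_min_index
      simp only [hlens, hminA]
      have := loopA_spec (yl :: Lr) M (yl :: Lr) 0 rfl hmem
      simpa using this
    -- B side
    have hB : calculate_min_index_alt (y :: rest)
        = (if M = yl then 0 else 1 + ((Lr.idxOf M : ℕ) : Int)) := by
      have h1 := loopB_spec rest (0 + 1) 0 (y.length : Int)
      unfold calculate_min_index_alt loopB_calculate_min_index
      simp only []
      rw [h1]
      by_cases h : M = yl <;> simp [← hLr, ← hyl, ← hM, h]
    rw [hA, hB]
    by_cases h : M = yl
    · rw [if_pos h, h, List.idxOf_cons_self]; rfl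
    · rw [if_neg h]
      have hne : (yl == M) = false := by simp [Ne.symm h]
      rw [List.idxOf_cons, hne]
      simp only [cond_false]
      push_cast
      ring
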